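-- pv_equiv track=rewrite | github.com/WEITINGLIN32/LeetCode | code/python/XofaKindinaDeckofCards.py | hasGroupsSizeX
-- ===== SOURCE A (Python) =====
-- def hasGroupsSizeX(deck):
--     """
--     :type deck: List[int]
--     :rtype: bool
--     """
--     dict = {}
--
--     for i in deck:
--         if i not in dict:
--             dict[i] = 1
--         else:
--             dict[i] += 1
--
--     istrue = []
--     for i in range(2,max(dict.values())+1):
--         tmp = 1
--         for j in dict:
--             if dict[j] % i != 0:
--                 tmp = 0
--                 break
--         if tmp == 1:
--             return True
--             break
--
--     if len(istrue) == 0: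
--         return False
-- ===== SOURCE B (Python) =====
-- def hasGroupsSizeX(deck):
--     counts = {}
--     for v in deck:
--         counts[v] = counts.get(v, 0) + 1
--     g = 0
--     for c in counts.values():
--         while c:
--             g, c = c, g % c
--     return g >= 2
-- ===== Notes on version B (the rewrite author's own statement) =====
-- stated objective: alternative
-- what changed: Instead of trying every candidate divisor i from 2 up to the maximum count against all counts, B folds a hand-written Euclid gcd over the counts once and returns gcd >= 2.
import Mathlib
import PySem

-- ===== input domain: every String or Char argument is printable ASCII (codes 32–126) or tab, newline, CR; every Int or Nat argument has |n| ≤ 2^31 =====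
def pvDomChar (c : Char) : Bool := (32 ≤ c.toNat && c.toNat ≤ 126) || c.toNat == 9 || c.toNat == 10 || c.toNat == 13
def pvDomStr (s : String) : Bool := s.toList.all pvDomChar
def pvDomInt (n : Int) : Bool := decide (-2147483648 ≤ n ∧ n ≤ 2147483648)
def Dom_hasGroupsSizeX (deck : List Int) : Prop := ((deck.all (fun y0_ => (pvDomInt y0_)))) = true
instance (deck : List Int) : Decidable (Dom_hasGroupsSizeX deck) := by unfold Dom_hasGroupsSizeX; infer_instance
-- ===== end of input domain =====

-- B replaces A's trial of every candidate group size 2..max(count) against all counts by a single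
-- Euclid-gcd fold over the counts ('gcd >= 2'): a different algorithm for the same answer.

-- ===== PORT A =====
-- A's counting loop: 'if i not in dict: dict[i] = 1 else: dict[i] += 1'
def pvBuildA (deck : List Int) : PySem.Dict Int Int :=
  deck.foldl
    (fun d i => if !(d.contains i) then d.insert i 1 else d.insert i (d.getD i 0 + 1))
    PySem.Dict.empty

-- inner 'for j in dict' loop: tmp becomes 0 at the first count not divisible by i
def pvInnerA (d : PySem.Dict Int Int) (i : Int) : List Int → Int
  | [] => 1
  | j :: rest => if PySem.Int.mod (d.getD j 0) i ≠ 0 then 0 else pvInnerA d i rest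

-- outer 'for i in range(2, max+1)' loop with the early 'return True'
def pvLoopA (d : PySem.Dict Int Int) : List Int → Bool
  | [] => false
  | i :: rest => if pvInnerA d i d.keys = 1 then true else pvLoopA d rest

def hasGroupsSizeX (deck : List Int) : Bool :=
  match PySem.List.max? (pvBuildA deck).values (fun y => y) with
  | none => false   -- unreachable under Pre_: Python's max([]) raises ValueError here
  | some m => pvLoopA (pvBuildA deck) (PySem.List.pyRange 2 (m + 1) 1)

-- ===== PORT B =====
-- B's counting loop: counts[v] = counts.get(v, 0) + 1
def pvCountB (deck : List Int) : PySem.Dict Int Int :=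
  deck.foldl (fun d v => d.insert v (d.getD v 0 + 1)) PySem.Dict.empty

-- the 'while c: g, c = c, g % c' loop of Source B
def pvGcd (g c : Int) : Int :=
  if h : c = 0 then g else pvGcd c (PySem.Int.mod g c)
termination_by c.natAbs
decreasing_by
  rcases lt_or_gt_of_ne h with hneg | hpos
  · have hb := PySem.Int.mod_neg_bounds g hneg; omega
  · have h1 := PySem.Int.mod_nonneg g hpos
    have h2 := PySem.Int.mod_lt g hpos; omega

def hasGroupsSizeX_alt (deck : List Int) : Bool :=
  decide (2 ≤ (pvCountB deck).values.foldl pvGcd 0)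

-- ===== PRECONDITION & SPEC =====
-- Pre_ excludes only the empty deck, on which A raises ValueError (max() of an empty sequence)
def Pre_hasGroupsSizeX (deck : List Int) : Prop := deck ≠ []
instance (deck : List Int) : Decidable (Pre_hasGroupsSizeX deck) := by unfold Pre_hasGroupsSizeX; infer_instance
def pvWitness_hasGroupsSizeX : List Int := [1, 1]

def Spec_hasGroupsSizeX (deck : List Int) (out : Bool) : Prop := out = hasGroupsSizeX_alt deck
instance (deck : List Int) (out : Bool) : Decidable (Spec_hasGroupsSizeX deck out) := by unfold Spec_hasGroupsSizeX; infer_instance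

-- ===== CLAIM (what is proved, stated in full; the proofs are below) =====
def Claim_equal_hasGroupsSizeX : Prop := ∀ (deck : List Int), Dom_hasGroupsSizeX deck → Pre_hasGroupsSizeX deck → Spec_hasGroupsSizeX deck (hasGroupsSizeX deck)

-- ===== LEMMAS AND PROOFS =====

-- both counting loops build collections.Counter(deck)
theorem buildA_eq_counter (deck : List Int) : pvBuildA deck = PySem.Dict.counter deck := by
  unfold pvBuildA
  rw [← PySem.Dict.foldl_insert_getD_add_one_eq_counter]
  apply PySem.List.foldl_congr_mem
  intro d i _
  by_cases hc : d.contains i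
  · simp [hc]
  · have h0 : d.getD i 0 = 0 :=
      PySem.Dict.getD_of_not_contains d 0 (by simpa using hc)
    simp [hc, h0]

theorem countB_eq_counter (deck : List Int) : pvCountB deck = PySem.Dict.counter deck :=
  PySem.Dict.foldl_insert_getD_add_one_eq_counter deck

-- Source B's hand-written Euclid loop computes the (nonnegative) gcd
theorem pvGcd_eq_gcd : ∀ (n : Nat) (g c : Int), 0 ≤ g → 0 ≤ c → c.toNat ≤ n →
    pvGcd g c = (Int.gcd g c : Int) := by
  intro n
  induction n with
  | zero =>
    intro g c hg hc hn
    have : c = 0 := by omega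
    subst this
    rw [pvGcd]
    simp [Int.gcd, Int.natAbs_of_nonneg hg]
  | succ n ih =>
    intro g c hg hc hn
    by_cases h0 : c = 0
    · subst h0
      rw [pvGcd]
      simp [Int.gcd, Int.natAbs_of_nonneg hg]
    · have hpos : 0 < c := lt_of_le_of_ne hc (Ne.symm h0)
      rw [pvGcd]
      simp only [h0, dite_false]
      have hr0 : 0 ≤ PySem.Int.mod g c := PySem.Int.mod_nonneg g hpos
      have hrlt : PySem.Int.mod g c < c := PySem.Int.mod_lt g hpos
      rw [ih c (PySem.Int.mod g c) hc hr0 (by omega)]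
      rw [PySem.Int.mod_eq_emod_of_pos hpos]
      have key : Int.gcd c (g % c) = Int.gcd g c := by
        rw [Int.gcd_comm, Int.gcd_emod]
      rw [key]

-- fold of pvGcd over nonnegative values: divides each of them, and any common divisor divides it
theorem foldG_props (l : List Int) : ∀ (g0 : Int), 0 ≤ g0 → (∀ v ∈ l, 0 ≤ v) →
    0 ≤ l.foldl pvGcd g0 ∧ l.foldl pvGcd g0 ∣ g0 ∧ (∀ v ∈ l, l.foldl pvGcd g0 ∣ v) ∧
    (∀ i : Int, i ∣ g0 → (∀ v ∈ l, i ∣ v) → i ∣ l.foldl pvGcd g0) := by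
  induction l with
  | nil =>
    intro g0 h0 _
    exact ⟨h0, dvd_rfl, by simp, fun i hi _ => hi⟩
  | cons v t ih =>
    intro g0 h0 hl
    have hv : 0 ≤ v := hl v (by simp)
    have hstep : pvGcd g0 v = (Int.gcd g0 v : Int) :=
      pvGcd_eq_gcd v.toNat g0 v h0 hv le_rfl
    have hrec := ih (pvGcd g0 v) (by rw [hstep]; exact Int.natCast_nonneg _)
      (fun w hw => hl w (by simp [hw]))
    simp only [List.foldl_cons]
    refine ⟨hrec.1, ?_, ?_, ?_⟩
    · exact hrec.2.1.trans (by rw [hstep]; exact Int.gcd_dvd_left _ _)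
    · intro w hw
      rcases List.mem_cons.mp hw with rfl | hw
      · exact hrec.2.1.trans (by rw [hstep]; exact Int.gcd_dvd_right _ _)
      · exact hrec.2.2.1 w hw
    · intro i hig hiv
      refine hrec.2.2.2 i ?_ (fun w hw => hiv w (by simp [hw]))
      rw [hstep]
      exact Int.dvd_coe_gcd hig (hiv v (by simp))

theorem innerA_eq_one_iff (d : PySem.Dict Int Int) (i : Int) (ks : List Int) :
    pvInnerA d i ks = 1 ↔ ∀ j ∈ ks, PySem.Int.mod (d.getD j 0) i = 0 := by
  induction ks with
  | nil => simp [pvInnerA]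
  | cons j rest ih =>
    by_cases hj : PySem.Int.mod (d.getD j 0) i = 0
    · simp [pvInnerA, hj, ih]
    · simp [pvInnerA, hj]

theorem loopA_true_iff (d : PySem.Dict Int Int) (r : List Int) :
    pvLoopA d r = true ↔ ∃ i ∈ r, pvInnerA d i d.keys = 1 := by
  induction r with
  | nil => simp [pvLoopA]
  | cons i rest ih =>
    by_cases hi : pvInnerA d i d.keys = 1
    · simp [pvLoopA, hi]
    · simp [pvLoopA, hi, ih]

-- ===== VERDICT (by name: the statement is the Claim_ definition above) =====
theorem hasGroupsSizeX_spec : Claim_equal_hasGroupsSizeX := by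
  intro deck _ hpre
  unfold Spec_hasGroupsSizeX hasGroupsSizeX hasGroupsSizeX_alt
  rw [buildA_eq_counter, countB_eq_counter]
  set d := PySem.Dict.counter deck with hd
  set vals := d.values with hvals
  set G := vals.foldl pvGcd 0 with hG
  -- the values of the counter are the multiplicities of the distinct elements
  have hvals_eq : vals = (PySem.Set.ofList deck).map (fun k => (deck.count k : Int)) := by
    show d.items.map (·.2) = _
    rw [hd, PySem.Dict.items_counter, List.map_map]
    rfl
  have hvpos : ∀ v ∈ vals, 1 ≤ v := by
    intro v hv
    rw [hvals_eq] at hv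
    rcases List.mem_map.mp hv with ⟨k, hk, rfl⟩
    have hmem : k ∈ deck := (PySem.Set.mem_ofList deck k).mp hk
    have hc : 0 < deck.count k := List.count_pos_iff.mpr hmem
    omega
  have hvne : vals ≠ [] := by
    rcases List.exists_mem_of_ne_nil deck hpre with ⟨x, hx⟩
    rw [hvals_eq]
    simp only [ne_eq, List.map_eq_nil_iff]
    intro hnil
    have hx' := (PySem.Set.mem_ofList deck x).mpr hx
    rw [hnil] at hx'
    simp at hx'
  obtain ⟨m, hm⟩ : ∃ m, PySem.List.max? vals (fun y => y) = some m := by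
    cases hmx : PySem.List.max? vals (fun y => y) with
    | none => exact absurd ((PySem.List.max?_eq_none_iff vals (fun y => y)).mp hmx) hvne
    | some m => exact ⟨m, rfl⟩
  have hm_mem : m ∈ vals := PySem.List.max?_mem hm
  have hGprops := foldG_props vals 0 le_rfl (fun v hv => le_trans zero_le_one (hvpos v hv))
  have hG0 : 0 ≤ G := hGprops.1
  have hGdvd : ∀ v ∈ vals, G ∣ v := hGprops.2.2.1
  have hGgreat : ∀ i : Int, (∀ v ∈ vals, i ∣ v) → i ∣ G :=
    fun i h => hGprops.2.2.2 i (dvd_zero i) h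
  have hGpos : 0 < G := by
    rcases hGdvd m hm_mem with ⟨q, hq⟩
    have hm1 : 1 ≤ m := hvpos m hm_mem
    rcases lt_or_eq_of_le hG0 with h | h
    · exact h
    · exfalso; rw [← h] at hq; simp at hq; omega
  -- 'all counts divisible by i' read over the keys equals it read over the values
  have hkeys : d.keys = PySem.Set.ofList deck := by rw [hd]; exact PySem.Dict.keys_counter deck
  have hinner : ∀ i : Int, (pvInnerA d i d.keys = 1 ↔ ∀ v ∈ vals, i ∣ v) := by
    intro i
    rw [innerA_eq_one_iff, hkeys]
    constructor
    · intro h v hv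
      rw [hvals_eq] at hv
      rcases List.mem_map.mp hv with ⟨k, hk, rfl⟩
      have := h k hk
      rw [hd, PySem.Dict.getD_counter] at this
      exact (PySem.Int.mod_eq_zero_iff_dvd _ _).mp this
    · intro h j hj
      rw [hd, PySem.Dict.getD_counter]
      refine (PySem.Int.mod_eq_zero_iff_dvd _ _).mpr (h _ ?_)
      rw [hvals_eq]
      exact List.mem_map.mpr ⟨j, hj, rfl⟩
  rw [hm]
  by_cases h2 : 2 ≤ G
  · have hGm : G ≤ m := Int.le_of_dvd (lt_of_lt_of_le zero_lt_one (hvpos m hm_mem)) (hGdvd m hm_mem)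
    have hloop : pvLoopA d (PySem.List.pyRange 2 (m + 1) 1) = true := by
      rw [loopA_true_iff]
      exact ⟨G, PySem.List.mem_pyRange_one.mpr ⟨h2, by omega⟩, (hinner G).mpr hGdvd⟩
    simp [hloop, h2]
  · have hloop : pvLoopA d (PySem.List.pyRange 2 (m + 1) 1) = false := by
      rw [← Bool.not_eq_true, loopA_true_iff]
      rintro ⟨i, hir, hi1⟩
      have hi2 : 2 ≤ i := (PySem.List.mem_pyRange_one.mp hir).1
      have hidvd : i ∣ G := hGgreat i ((hinner i).mp hi1)
      have : i ≤ G := Int.le_of_dvd hGpos hidvd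
      omega
    simp [hloop, h2]
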